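-- pv_equiv track=rewrite | github.com/RAM1R0-STR/python-practice-exercises | extraer_primos_por_cantidad.py | extraerPrimosPorCantidad
-- ===== SOURCE A (Python) =====
-- def Primos(n):
--     cont = 0
--     for i in range(1,n+1,1):
--         div = n%i
--         if div == 0:
--             cont = cont + 1
--     if cont == 2:
--         return True
--     else:
--         return False
--
-- def extraerPrimosPorCantidad(numero,n):
--     primos = ""
--     numeroStr = str(numero)
--     for numStr in numeroStr:
--         numInt = int(numStr)
--         tof = Primos(numInt)
--         if tof == True:
--             if len(primos) < n:
--                 primos = primos + numStr
--     return primos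
-- ===== SOURCE B (Python) =====
-- def extraerPrimosPorCantidad(numero, n):
--     # Only the digits 2, 3, 5, 7 are prime: filter them out, then keep the first n.
--     primes = [c for c in str(numero) if c in "2357"]
--     return "".join(primes[:max(0, n)])
-- ===== Notes on version B (the rewrite author's own statement) =====
-- stated objective: simpler
-- what changed: B replaces A's per-digit trial-division divisor count (the Primos helper looping i=1..d) and the stateful length-guarded accumulation by a direct filter of the digit characters against the constant prime-digit string "2357" followed by taking the first max(0,n) of them.
import Mathlib
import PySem

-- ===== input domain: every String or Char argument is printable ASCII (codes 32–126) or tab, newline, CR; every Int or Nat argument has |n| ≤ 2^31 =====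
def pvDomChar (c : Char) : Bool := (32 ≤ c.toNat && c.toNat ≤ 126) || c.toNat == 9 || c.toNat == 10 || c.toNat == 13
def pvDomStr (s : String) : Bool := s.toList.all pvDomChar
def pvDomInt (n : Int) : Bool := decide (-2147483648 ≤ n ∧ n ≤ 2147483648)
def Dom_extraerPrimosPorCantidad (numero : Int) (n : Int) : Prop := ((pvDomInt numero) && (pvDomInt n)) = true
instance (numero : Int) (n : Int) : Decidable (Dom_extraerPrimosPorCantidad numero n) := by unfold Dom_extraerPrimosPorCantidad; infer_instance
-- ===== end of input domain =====

-- B replaces A's trial-division primality helper and stateful length-guarded accumulation by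
-- filtering the digit characters against the constant "2357" and taking the first max(0,n); simpler.
-- ===== PORT A =====
-- helper Primos(n): counts divisors of n by trial division, prime iff exactly 2
def pvPrimos (num : Int) : Bool :=
  let cont := (PySem.List.pyRange 1 (num + 1) 1).foldl
      (fun cont i => if PySem.Int.mod num i = 0 then cont + 1 else cont) (0 : Int)
  if cont = 2 then true else false

-- the for-loop of A; `none` = the ValueError of int(numStr) on a non-digit character
def pvAGo (n : Int) : List Char → List Char → Option (List Char)
  | [], primos => some primos
  | c :: rest, primos =>
    match PySem.Int.ofChars? [c] with
    | none => none
    | some numInt =>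
      let tof := pvPrimos numInt
      if tof = true then
        if (primos.length : Int) < n then pvAGo n rest (primos ++ [c])
        else pvAGo n rest primos
      else pvAGo n rest primos

def extraerPrimosPorCantidad (numero : Int) (n : Int) : String :=
  String.mk ((pvAGo n (PySem.Int.toChars numero) []).getD [])

-- ===== PORT B =====
def extraerPrimosPorCantidad_alt (numero : Int) (n : Int) : String :=
  let primes := (PySem.Int.toChars numero).filter
      (fun c => PySem.Chars.isIn [c] ['2', '3', '5', '7'])
  String.mk (PySem.List.slice primes none (some (max 0 n)))

-- ===== PRECONDITION & SPEC =====
-- Pre_ excludes numero < 0, where str(numero) starts with '-' and A raises ValueError on int('-').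
def Pre_extraerPrimosPorCantidad (numero : Int) (n : Int) : Prop := 0 ≤ numero
instance (numero : Int) (n : Int) : Decidable (Pre_extraerPrimosPorCantidad numero n) := by
  unfold Pre_extraerPrimosPorCantidad; infer_instance
def pvWitness_extraerPrimosPorCantidad : Int × Int := (2357, 3)

def Spec_extraerPrimosPorCantidad (numero : Int) (n : Int) (out : String) : Prop :=
  out = extraerPrimosPorCantidad_alt numero n
instance (numero : Int) (n : Int) (out : String) : Decidable (Spec_extraerPrimosPorCantidad numero n out) := by
  unfold Spec_extraerPrimosPorCantidad; infer_instance

-- ===== CLAIM (what is proved, stated in full; the proofs are below) =====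
def Claim_equal_extraerPrimosPorCantidad : Prop := ∀ (numero : Int) (n : Int),
  Dom_extraerPrimosPorCantidad numero n → Pre_extraerPrimosPorCantidad numero n →
  Spec_extraerPrimosPorCantidad numero n (extraerPrimosPorCantidad numero n)

-- ===== LEMMAS AND PROOFS =====
def pvIsDig (c : Char) : Bool := ['0','1','2','3','4','5','6','7','8','9'].contains c
def pvIsP (c : Char) : Bool := PySem.Chars.isIn [c] ['2', '3', '5', '7']

lemma pv_digitChar_dig (m : Nat) (h : m < 10) : pvIsDig (Nat.digitChar m) = true := by
  interval_cases m <;> decide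

lemma pv_toDigitsCore_dig (f : Nat) : ∀ (n : Nat) (acc : List Char),
    (∀ c ∈ acc, pvIsDig c = true) → ∀ c ∈ Nat.toDigitsCore 10 f n acc, pvIsDig c = true := by
  induction f with
  | zero => intro n acc hacc c hc; simp only [Nat.toDigitsCore] at hc; exact hacc c hc
  | succ f ih =>
    intro n acc hacc c hc
    have hcons : ∀ c ∈ Nat.digitChar (n % 10) :: acc, pvIsDig c = true := by
      intro x hx
      rcases List.mem_cons.mp hx with h | h
      · subst h; exact pv_digitChar_dig _ (Nat.mod_lt _ (by norm_num))
      · exact hacc x h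
    simp only [Nat.toDigitsCore] at hc
    split at hc
    · exact hcons c hc
    · exact ih _ _ hcons c hc

lemma pv_toChars_dig (numero : Int) (h : 0 ≤ numero) :
    ∀ c ∈ PySem.Int.toChars numero, pvIsDig c = true := by
  simp only [PySem.Int.toChars, if_neg (not_lt.mpr h), Nat.toDigits]
  exact pv_toDigitsCore_dig _ _ [] (by simp)

lemma pv_char_step (c : Char) (h : pvIsDig c = true) :
    ∃ v, PySem.Int.ofChars? [c] = some v ∧ pvPrimos v = pvIsP c := by
  simp only [pvIsDig, List.contains_eq_mem, List.mem_cons, decide_eq_true_eq,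
    List.not_mem_nil, or_false] at h
  rcases h with rfl | rfl | rfl | rfl | rfl | rfl | rfl | rfl | rfl | rfl
  · exact ⟨0, by decide, by decide⟩
  · exact ⟨1, by decide, by decide⟩
  · exact ⟨2, by decide, by decide⟩
  · exact ⟨3, by decide, by decide⟩
  · exact ⟨4, by decide, by decide⟩
  · exact ⟨5, by decide, by decide⟩
  · exact ⟨6, by decide, by decide⟩
  · exact ⟨7, by decide, by decide⟩
  · exact ⟨8, by decide, by decide⟩
  · exact ⟨9, by decide, by decide⟩

lemma pv_loop_eq (n : Int) : ∀ (cs : List Char) (primos : List Char),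
    (∀ c ∈ cs, pvIsDig c = true) →
    pvAGo n cs primos =
      some (primos ++ (cs.filter pvIsP).take ((n - primos.length).toNat)) := by
  intro cs
  induction cs with
  | nil => intro primos _; simp [pvAGo]
  | cons c rest ih =>
    intro primos hall
    obtain ⟨v, hv, hp⟩ := pv_char_step c (hall c (by simp))
    have hrest : ∀ x ∈ rest, pvIsDig x = true := fun x hx => hall x (by simp [hx])
    simp only [pvAGo, hv]
    by_cases hP : pvIsP c = true
    · by_cases hlt : (primos.length : Int) < n
      · have hk : (n - (primos.length : Int)).toNat
            = (n - ((primos ++ [c]).length : Int)).toNat + 1 := by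
          simp only [List.length_append, List.length_cons, List.length_nil]
          omega
        simp only [hp, hP, if_true, hlt, ih _ hrest, List.filter_cons, hP, hk,
          List.take_succ_cons, List.append_assoc, List.cons_append, List.nil_append]
      · have hk : (n - (primos.length : Int)).toNat = 0 := by omega
        simp [hp, hP, hlt, ih _ hrest, List.filter_cons, hk]
    · simp [hp, hP, ih _ hrest, List.filter_cons]

-- ===== VERDICT (by name: the statement is the Claim_ definition above) =====
theorem extraerPrimosPorCantidad_spec : Claim_equal_extraerPrimosPorCantidad := by
  intro numero n _ hpre
  unfold Spec_extraerPrimosPorCantidad extraerPrimosPorCantidad extraerPrimosPorCantidad_alt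
  rw [pv_loop_eq n _ [] (pv_toChars_dig numero hpre)]
  show _ = String.mk (PySem.List.slice _ none (some (max 0 n)))
  rw [PySem.List.slice_to _ (le_max_left 0 n)]
  have h1 : (n - (([] : List Char).length : Int)).toNat = (max 0 n).toNat := by
    simp; omega
  simp only [Option.getD_some, List.nil_append, h1]
  rfl
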